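-- pv_equiv track=rewrite | github.com/messor2000/postman_importer_burp_extension | postman.py | clean_tests
-- ===== SOURCE A (Python) =====
-- def clean_tests(input_str):
--     lines = input_str.split('\n')
--
--     cleaned_lines = []
--     skip_line = False
--     for line in lines:
--         line = line.strip()
--         if skip_line:
--             if line.endswith('});'):
--                 skip_line = False
--         elif line.startswith('pm.test'):
--             skip_line = True
--         elif line and not line.startswith('//') and not line.startswith('/*') and not line.startswith('console.log') \
--                 and 'JSON.parse(responseBody)' not in line:
--             cleaned_lines.append(line)
--
--     cleaned_input = '\n'.join(cleaned_lines)
--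
--     return cleaned_input
-- ===== SOURCE B (Python) =====
-- def _keep(line):
--     return (line and not line.startswith('//') and not line.startswith('/*')
--             and not line.startswith('console.log')
--             and 'JSON.parse(responseBody)' not in line)
--
--
-- def clean_tests(input_str):
--     # Stage 1: strip every line up front; stage 2: cut the line list into segments
--     # at pm.test headers using index searches, batch-filter each plain segment,
--     # and slice away each test block up to and including its '});' closer.
--     stripped = [l.strip() for l in input_str.split('\n')]
--     out = []
--     rest = stripped
--     while True:
--         j = next((k for k, l in enumerate(rest) if l.startswith('pm.test')), None)
--         if j is None:
--             out.extend(filter(_keep, rest))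
--             break
--         out.extend(filter(_keep, rest[:j]))
--         tail = rest[j + 1:]
--         c = next((k for k, l in enumerate(tail) if l.endswith('});')), None)
--         if c is None:
--             break
--         rest = tail[c + 1:]
--     return '\n'.join(out)
-- ===== Notes on version B (the rewrite author's own statement) =====
-- stated objective: alternative
-- what changed: Replaces A's per-line skip_line state machine with a staged segment-based scan: all lines are stripped up front, then the line list is repeatedly cut at the next test-block header found by an index search, each plain segment is batch-filtered with filter(), and the block is sliced away up to and including its closing line found by a second index search.
import Mathlib
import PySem

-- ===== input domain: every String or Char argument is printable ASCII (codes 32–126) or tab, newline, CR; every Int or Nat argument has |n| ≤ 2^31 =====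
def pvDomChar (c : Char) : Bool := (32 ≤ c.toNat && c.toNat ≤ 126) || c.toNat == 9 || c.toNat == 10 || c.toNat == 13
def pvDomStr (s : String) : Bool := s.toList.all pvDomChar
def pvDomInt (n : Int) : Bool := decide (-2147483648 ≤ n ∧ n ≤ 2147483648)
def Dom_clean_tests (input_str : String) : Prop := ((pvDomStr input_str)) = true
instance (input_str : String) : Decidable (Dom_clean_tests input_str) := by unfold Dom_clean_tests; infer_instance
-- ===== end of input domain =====

-- B replaces A's per-line skip_line state machine with a staged, segment-based scan:
-- strip all lines once, then repeatedly locate the next pm.test header and its '});'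
-- closer by index search, batch-filtering each plain segment (alternative decomposition).

-- the shared filter predicate (identical literal condition in both Pythons)
def pvKeep (line : String) : Bool :=
  !(line == "") && !(PySem.Str.startswith line "//") && !(PySem.Str.startswith line "/*")
    && !(PySem.Str.startswith line "console.log")
    && !(PySem.Str.isIn "JSON.parse(responseBody)" line)

-- B's two marker tests (the generator predicates of its `next(...)` index searches)
def pvIsHeader (l : String) : Bool := PySem.Str.startswith l "pm.test"
def pvIsCloser (l : String) : Bool := PySem.Str.endswith l "});"

-- ===== PORT A =====
-- A's for-loop over the lines, carrying the skip_line flag as state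
def cleanA : List String → Bool → List String
  | [], _ => []
  | l :: ls, skip =>
    let line := PySem.Str.strip l
    if skip then
      if PySem.Str.endswith line "});" then cleanA ls false else cleanA ls true
    else if PySem.Str.startswith line "pm.test" then cleanA ls true
    else if pvKeep line then line :: cleanA ls false
    else cleanA ls false

def clean_tests (input_str : String) : String :=
  -- split? is `some` here since the separator "\n" is non-empty
  PySem.Str.join "\n" (cleanA ((PySem.Str.split? input_str "\n").getD []) false)

-- ===== PORT B =====
-- bound needed by cleanB's termination argument
theorem pvFindIdx?_lt_length {p : String → Bool} : ∀ {ls : List String} {j : Nat},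
    ls.findIdx? p = some j → j < ls.length
  | l :: ls, j, h => by
    rw [List.findIdx?_cons] at h
    by_cases hp : p l
    · simp [hp] at h; simp [← h]
    · simp only [hp] at h
      cases hf : ls.findIdx? p with
      | none => simp [hf] at h
      | some k =>
        have := pvFindIdx?_lt_length hf
        simp [hf] at h
        simp [← h, List.length_cons]
        omega

-- B's outer while loop: `rest` is the remaining suffix of the stripped lines;
-- `next(... enumerate ...)` is the index search `findIdx?`, the slices rest[:j]/rest[j+1:]
-- are take/drop, and `filter(_keep, ·)` is List.filter.
def cleanB (ls : List String) : List String :=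
  match h : ls.findIdx? pvIsHeader with
  | none => ls.filter pvKeep
  | some j =>
    (ls.take j).filter pvKeep ++
      match (ls.drop (j + 1)).findIdx? pvIsCloser with
      | none => []
      | some c => cleanB ((ls.drop (j + 1)).drop (c + 1))
termination_by ls.length
decreasing_by
  have hj : j < ls.length := pvFindIdx?_lt_length h
  have h1 : (ls.drop (j + 1)).length = ls.length - (j + 1) := List.length_drop
  have h2 : ((ls.drop (j + 1)).drop (c + 1)).length = (ls.drop (j + 1)).length - (c + 1) :=
    List.length_drop
  omega

def clean_tests_alt (input_str : String) : String :=
  -- split? is `some` here since the separator "\n" is non-empty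
  PySem.Str.join "\n"
    (cleanB (((PySem.Str.split? input_str "\n").getD []).map PySem.Str.strip))

-- ===== PRECONDITION & SPEC =====
def Spec_clean_tests (input_str : String) (out : String) : Prop := out = clean_tests_alt input_str
instance (input_str : String) (out : String) : Decidable (Spec_clean_tests input_str out) := by unfold Spec_clean_tests; infer_instance

-- ===== CLAIM (what is proved, stated in full; the proofs are below) =====
def Claim_equal_clean_tests : Prop := ∀ (input_str : String), Dom_clean_tests input_str → Spec_clean_tests input_str (clean_tests input_str)

-- ===== LEMMAS AND PROOFS =====

-- A's loop restated on the pre-stripped lines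
def cleanS : List String → Bool → List String
  | [], _ => []
  | l :: ls, skip =>
    if skip then
      if pvIsCloser l then cleanS ls false else cleanS ls true
    else if pvIsHeader l then cleanS ls true
    else if pvKeep l then l :: cleanS ls false
    else cleanS ls false

theorem cleanA_eq_cleanS : ∀ (ls : List String) (b : Bool),
    cleanA ls b = cleanS (ls.map PySem.Str.strip) b
  | [], _ => rfl
  | l :: ls, b => by
    simp only [cleanA, cleanS, List.map_cons, pvIsCloser, pvIsHeader]
    split_ifs <;> simp [cleanA_eq_cleanS ls]

-- A's skip = true phase is B's search for the '});' closer
theorem cleanS_true : ∀ ls : List String,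
    cleanS ls true =
      match ls.findIdx? pvIsCloser with
      | none => []
      | some c => cleanS (ls.drop (c + 1)) false
  | [] => rfl
  | l :: ls => by
    simp only [cleanS, List.findIdx?_cons]
    by_cases h : pvIsCloser l
    · simp [h]
    · simp only [h, Bool.false_eq_true, if_false]
      rw [cleanS_true ls]
      cases ls.findIdx? pvIsCloser <;> simp

-- cleanB's dependent match restated as a plain match (for rewriting)
theorem cleanB_eq (ls : List String) : cleanB ls =
    (match ls.findIdx? pvIsHeader with
     | none => ls.filter pvKeep
     | some j =>
       (ls.take j).filter pvKeep ++
         match (ls.drop (j + 1)).findIdx? pvIsCloser with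
         | none => []
         | some c => cleanB ((ls.drop (j + 1)).drop (c + 1))) := by
  rw [cleanB]
  split <;> rename_i heq <;> simp [heq]

-- B on a header line: skip to just after the closer
theorem cleanB_header {l : String} (ls : List String) (h : pvIsHeader l = true) :
    cleanB (l :: ls) =
      match ls.findIdx? pvIsCloser with
      | none => []
      | some c => cleanB (ls.drop (c + 1)) := by
  rw [cleanB_eq]
  have h0 : (l :: ls).findIdx? pvIsHeader = some 0 := by
    rw [List.findIdx?_cons]; simp [h]
  simp only [h0, List.take_zero, List.filter_nil, List.drop_succ_cons, List.drop_zero,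
    List.nil_append]

-- B on a non-header line: filter it and continue
theorem cleanB_plain {l : String} (ls : List String) (h : pvIsHeader l = false) :
    cleanB (l :: ls) = (if pvKeep l then [l] else []) ++ cleanB ls := by
  by_cases hk : pvKeep l
  all_goals rw [cleanB_eq, cleanB_eq ls]
  all_goals cases hf : ls.findIdx? pvIsHeader with
  | none => simp [List.findIdx?_cons, h, hf, hk]
  | some j => simp [List.findIdx?_cons, h, hf, hk]

-- the main correspondence: one pm.test block at a time
theorem cleanS_eq_cleanB : ∀ ls : List String, cleanS ls false = cleanB ls := by
  intro ls
  induction hn : ls.length using Nat.strong_induction_on generalizing ls with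
  | _ n ih =>
    cases ls with
    | nil => rw [cleanB]; rfl
    | cons l ls =>
      by_cases h : pvIsHeader l
      · rw [cleanB_header ls h]
        simp only [cleanS, h, if_true]
        rw [cleanS_true ls]
        cases hf : ls.findIdx? pvIsCloser with
        | none => rfl
        | some c =>
          have hl : (ls.drop (c + 1)).length = ls.length - (c + 1) := List.length_drop
          exact ih _ (by simp at hn; omega) _ rfl
      · rw [cleanB_plain ls (by simpa using h)]
        have hrec := ih ls.length (by simp at hn; omega) ls rfl
        simp only [cleanS, h, Bool.false_eq_true, if_false]
        split_ifs with hk <;> simp [hrec]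

-- ===== VERDICT (by name: the statement is the Claim_ definition above) =====
theorem clean_tests_spec : Claim_equal_clean_tests := by
  intro s _
  unfold Spec_clean_tests clean_tests clean_tests_alt
  rw [cleanA_eq_cleanS, cleanS_eq_cleanB]
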